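-- pv_equiv track=rewrite | github.com/choco9966/Algorithm-Master | programmers/level2/code/쇠막대기.py | solution
-- ===== SOURCE A (Python) =====
-- def solution(arrangement):
--     answer = 0
--     # 여는 괄호가 나오면, 닫힌 괄호가 나오기전까지 몇개의 레이저가 있는 지 확인해야 함
--     # 주의 : ()는 레이저이기때문에 하나의 문자열로 인식해야 함
--     arrangement = arrangement.replace('()', '-')
--     stack = []
--     for i in arrangement:
--         if i == '(':
--             stack.append(0)
--         elif i == ')':
--             stack.pop()
--             answer += 1
--         else:
--             answer += len(stack)
--     return answer
-- ===== SOURCE B (Python) =====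
-- def solution(arrangement):
--     answer = 0
--     depth = 0
--     prev = ''
--     for ch in arrangement:
--         if ch == '(':
--             depth += 1
--         elif ch == ')':
--             depth -= 1
--             answer += depth if prev == '(' else 1
--         else:
--             answer += depth
--         prev = ch
--     return answer
-- ===== Notes on version B (the rewrite author's own statement) =====
-- stated objective: simpler
-- what changed: Dropped the replace('()','-') preprocessing pass and the stack list: one pass over the original string with an integer depth counter and the previous character, classifying each ')' as laser (previous char '(') or bar end on the fly.
import Mathlib
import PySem

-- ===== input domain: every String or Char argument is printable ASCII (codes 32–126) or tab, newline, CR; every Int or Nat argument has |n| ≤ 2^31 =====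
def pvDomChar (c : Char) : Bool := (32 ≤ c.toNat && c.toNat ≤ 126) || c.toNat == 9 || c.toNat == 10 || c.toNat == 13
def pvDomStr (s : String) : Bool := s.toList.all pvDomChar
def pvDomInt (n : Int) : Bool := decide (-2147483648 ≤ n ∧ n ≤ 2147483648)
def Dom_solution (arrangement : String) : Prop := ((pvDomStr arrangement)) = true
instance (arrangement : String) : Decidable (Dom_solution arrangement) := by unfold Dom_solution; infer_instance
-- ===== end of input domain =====

-- B drops A's replace('()','-') pass and the stack list: one pass with an integer depth
-- counter and the previous character (simpler; return-value equivalence on balanced-prefix inputs).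

-- ===== PORT A =====
-- loop over the replaced string; stack of zeros, stack.pop() = PySem.List.pop? (none = IndexError)
def solA_loop : List Char → Int → List Int → Option Int
  | [], answer, _ => some answer
  | c :: rest, answer, stack =>
    if c = '(' then solA_loop rest answer (stack ++ [0])
    else if c = ')' then
      match PySem.List.pop? stack with
      | none => none
      | some (_, st) => solA_loop rest (answer + 1) st
    else solA_loop rest (answer + stack.length) stack

def solution (arrangement : String) : Int :=
  (solA_loop (PySem.Str.replace arrangement "()" "-").toList 0 []).getD 0

-- ===== PORT B =====
def solB_loop : List Char → Int → Int → String → Int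
  | [], answer, _, _ => answer
  | ch :: rest, answer, depth, prev =>
    if ch = '(' then solB_loop rest answer (depth + 1) (String.ofList [ch])
    else if ch = ')' then
      solB_loop rest (answer + (if prev = "(" then depth - 1 else 1)) (depth - 1) (String.ofList [ch])
    else solB_loop rest (answer + depth) depth (String.ofList [ch])

def solution_alt (arrangement : String) : Int :=
  solB_loop arrangement.toList 0 0 ""

-- ===== PRECONDITION & SPEC =====
-- Pre_ excludes exactly the inputs with a prefix containing more ')' than '(' — there A's
-- stack.pop() raises IndexError (A returns on every other input).
def Pre_solution (arrangement : String) : Prop :=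
  ∀ n ∈ List.range (arrangement.toList.length + 1),
    (arrangement.toList.take n).count ')' ≤ (arrangement.toList.take n).count '('
instance (arrangement : String) : Decidable (Pre_solution arrangement) := by
  unfold Pre_solution; infer_instance
def pvWitness_solution : String := "()(())-x"

def Spec_solution (arrangement : String) (out : Int) : Prop := out = solution_alt arrangement
instance (arrangement : String) (out : Int) : Decidable (Spec_solution arrangement out) := by
  unfold Spec_solution; infer_instance

-- ===== CLAIM (what is proved, stated in full; the proofs are below) =====
def Claim_equal_solution : Prop := ∀ (arrangement : String), Dom_solution arrangement → Pre_solution arrangement → Spec_solution arrangement (solution arrangement)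

-- ===== LEMMAS AND PROOFS =====

-- proof helper: what replace('()','-') produces, as a one-pass recursion
def rep : List Char → List Char
  | [] => []
  | [c] => [c]
  | c :: d :: r => if c = '(' ∧ d = ')' then '-' :: rep r else c :: rep (d :: r)

theorem replace_go_eq (fuel : Nat) : ∀ (l acc : List Char), l.length ≤ fuel →
    PySem.Chars.replace.go ['(', ')'] ['-'] fuel l acc = acc.reverse ++ rep l := by
  induction fuel with
  | zero =>
    intro l acc h
    have hl : l = [] := List.eq_nil_of_length_eq_zero (Nat.le_zero.mp h)
    subst hl
    rw [PySem.Chars.replace.go.eq_def]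
    simp [rep]
  | succ n ih =>
    intro l acc h
    rw [PySem.Chars.replace.go.eq_def]
    rcases l with _ | ⟨c, _ | ⟨d, t⟩⟩
    · simp [rep]
    · -- single char: prefix test fails
      have hpre : (['(', ')'].isPrefixOf [c]) = false := by
        simp [List.isPrefixOf]
      simp only [hpre]
      have := ih [] (c :: acc) (by simp)
      simp [rep] at this ⊢
      simpa using this
    · by_cases hp : c = '(' ∧ d = ')'
      · obtain ⟨hc, hd⟩ := hp
        subst hc; subst hd
        have hpre : (['(', ')'].isPrefixOf ('(' :: ')' :: t)) = true := by
          simp [List.isPrefixOf]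
        simp only [hpre, if_pos]
        have := ih t ('-' :: acc) (by simp at h ⊢; omega)
        simp [rep, this]
      · have hpre : (['(', ')'].isPrefixOf (c :: d :: t)) = false := by
          simp [List.isPrefixOf]
          intro hc hd; exact hp ⟨hc.symm, hd.symm⟩
        simp only [hpre]
        have := ih (d :: t) (c :: acc) (by simp at h ⊢; omega)
        simp [rep, hp, this]

theorem replace_eq_rep (s : List Char) :
    PySem.Chars.replace s ['(', ')'] ['-'] = rep s := by
  rw [PySem.Chars.replace]
  simp [replace_go_eq s.length s [] le_rfl]

theorem pop?_nonempty {stack : List Int} (h : stack ≠ []) :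
    PySem.List.pop? stack = some (stack.getLast h, stack.dropLast) := by
  conv_lhs => rw [← List.dropLast_append_getLast h]
  exact PySem.List.pop?_last _ _

theorem loop_eq (l : List Char) : ∀ (ans : Int) (stack : List Int) (prev : String),
    (∀ n, (l.take n).count ')' ≤ stack.length + (l.take n).count '(') →
    (∀ r, l = ')' :: r → prev ≠ "(") →
    solA_loop (rep l) ans stack = some (solB_loop l ans stack.length prev) := by
  induction l using rep.induct with
  | case1 =>
    intro ans stack prev _ _
    simp [rep, solA_loop, solB_loop]
  | case2 c =>
    intro ans stack prev hbal hprev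
    by_cases hc : c = '('
    · subst hc
      simp [rep, solA_loop, solB_loop]
    · by_cases hd : c = ')'
      · subst hd
        have hne : stack ≠ [] := by
          have := hbal 1
          simp at this
          intro he; rw [he] at this; simp at this
        have hp : prev ≠ "(" := hprev [] rfl
        simp [rep, solA_loop, solB_loop, pop?_nonempty hne, hp]
      · simp [rep, solA_loop, solB_loop, hc, hd]
  | case3 c d r hp ih =>
    intro ans stack prev hbal hprev
    obtain ⟨hc, hd⟩ := hp
    subst hc; subst hd
    have hA : rep ('(' :: ')' :: r) = '-' :: rep r := by simp [rep]
    rw [hA]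
    have hbal' : ∀ n, (r.take n).count ')' ≤ stack.length + (r.take n).count '(' := by
      intro n
      have := hbal (n + 2)
      simp at this
      omega
    have hih := ih (ans + stack.length) stack ")" hbal' (by intro r' _; decide)
    simp [solA_loop, solB_loop, hih]
  | case4 c d r hp ih =>
    intro ans stack prev hbal hprev
    have hA : rep (c :: d :: r) = c :: rep (d :: r) := by simp [rep, hp]
    rw [hA]
    by_cases hc : c = '('
    · subst hc
      have hd : d ≠ ')' := fun h => hp ⟨rfl, h⟩
      have hbal' : ∀ n, ((d :: r).take n).count ')' ≤ (stack ++ [0]).length + ((d :: r).take n).count '(' := by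
        intro n
        have := hbal (n + 1)
        simp at this ⊢
        omega
      have hih := ih ans (stack ++ [(0 : Int)]) "(" hbal' (by intro r' he; injection he with h1 _; exact absurd h1 hd)
      simp at hih
      simp [solA_loop, solB_loop, hih]
    · by_cases hcd : c = ')'
      · subst hcd
        have hne : stack ≠ [] := by
          have := hbal 1
          simp at this
          intro he; rw [he] at this; simp at this
        have hp' : prev ≠ "(" := hprev _ rfl
        have hlen : stack.dropLast.length = stack.length - 1 := by simp
        have hlen1 : 1 ≤ stack.length := by
          cases stack <;> simp_all
        have hbal' : ∀ n, ((d :: r).take n).count ')' ≤ stack.dropLast.length + ((d :: r).take n).count '(' := by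
          intro n
          have := hbal (n + 1)
          simp at this ⊢
          omega
        have hih := ih (ans + 1) stack.dropLast ")" hbal' (by intro r' _; decide)
        have hcast : ((stack.dropLast.length : Nat) : Int) = (stack.length : Int) - 1 := by
          rw [hlen]; omega
        rw [hcast] at hih
        simp [solA_loop, solB_loop, pop?_nonempty hne, hp', hih]
      · have hbal' : ∀ n, ((d :: r).take n).count ')' ≤ stack.length + ((d :: r).take n).count '(' := by
          intro n
          have := hbal (n + 1)
          simp [hc, hcd] at this ⊢
          omega
        have hprev' : String.ofList [c] ≠ "(" := by
          intro he
          apply hc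
          have : ([c] : List Char) = ['('] := by
            have := congrArg String.toList he
            simpa using this
          simpa using this
        have hih := ih (ans + stack.length) stack (String.ofList [c]) hbal' (fun r' _ => hprev')
        simp [solA_loop, solB_loop, hc, hcd, hih]

theorem pre_all (s : String) (h : Pre_solution s) :
    ∀ n, (s.toList.take n).count ')' ≤ (s.toList.take n).count '(' := by
  intro n
  by_cases hn : n ≤ s.toList.length
  · exact h n (List.mem_range.mpr (by omega))
  · have h1 : s.toList.take n = s.toList.take s.toList.length := by
      rw [List.take_of_length_le (by omega), List.take_length]
    rw [h1]
    exact h s.toList.length (List.mem_range.mpr (by omega))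

-- ===== VERDICT (by name: the statement is the Claim_ definition above) =====
theorem solution_spec : Claim_equal_solution := by
  intro s _ hpre
  unfold Spec_solution solution solution_alt
  rw [PySem.Str.toList_replace]
  have h1 : (("()" : String).toList) = ['(', ')'] := by decide
  have h2 : (("-" : String).toList) = ['-'] := by decide
  rw [h1, h2, replace_eq_rep]
  have := loop_eq s.toList 0 [] ""
    (by intro n; simpa using pre_all s hpre n)
    (by intro r _; decide)
  simp at this
  rw [this]
  simp
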